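-- pv_equiv track=rewrite | github.com/ashish0117/LeetCode-Solutions-in-Python | Count Integers With Even Digit Sum Test.py | findevensumofdigits
-- ===== SOURCE A (Python) =====
-- from typing import List
--
-- def findevensumofdigits(num:int)->List:   # function with input and output parameters
--     li =[]
--     sum = 0 # for checking sum value as even or not
--
--     for i in range(num):
--         sum=0
--         for digit in str(i):
--             sum += int(digit) # finding sum of digits of a number
--
--         if int(sum%2) ==0:
--             li.append(i)  # fill list with even digit numbers
--     return li
-- ===== SOURCE B (Python) =====
-- def findevensumofdigits(num: int) -> list:
--     # Incremental digit-sum parity: p is the parity of the digit sum of i,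
--     # updated in O(1) amortized using the count of trailing 9s (the carry chain).
--     li = []
--     p = 0
--     for i in range(num):
--         if p == 0:
--             li.append(i)
--         t, j = 0, i
--         while j % 10 == 9:
--             t += 1
--             j //= 10
--         p = (p + 1 + t) % 2
--     return li
-- ===== Notes on version B (the rewrite author's own statement) =====
-- stated objective: faster
-- what changed: Instead of recomputing each i's digit sum via str()/int() per digit, B maintains the digit-sum parity across consecutive i, updating it in O(1) amortized from the number of trailing 9s (the carry chain).
import Mathlib
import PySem

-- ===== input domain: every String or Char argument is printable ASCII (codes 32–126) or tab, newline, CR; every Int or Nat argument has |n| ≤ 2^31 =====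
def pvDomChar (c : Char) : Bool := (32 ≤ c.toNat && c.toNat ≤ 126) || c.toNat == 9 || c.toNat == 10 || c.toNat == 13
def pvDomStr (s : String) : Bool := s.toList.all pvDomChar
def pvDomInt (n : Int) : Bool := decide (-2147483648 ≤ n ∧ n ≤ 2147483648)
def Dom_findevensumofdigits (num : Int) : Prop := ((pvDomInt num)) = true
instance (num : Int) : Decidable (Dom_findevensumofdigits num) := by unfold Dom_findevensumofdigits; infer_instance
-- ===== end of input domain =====

-- B replaces A's per-number string digit sum by an incrementally maintained digit-sum
-- parity (O(1) amortized carry update via trailing 9s); measured faster at large sizes.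

-- ===== PORT A =====
-- A: for i in range(num): sum = Σ int(digit) over str(i); append i if sum % 2 == 0.
-- int(digit): each char of str(i) for i ≥ 0 is an ASCII digit, so int() never raises;
-- the '.getD 0' default is unreachable there.
def findevensumofdigits (num : Int) : List Int :=
  (PySem.List.pyRange 0 num).foldl (fun li i =>
    let sum : Int := (PySem.Int.toStr i).toList.foldl
      (fun s c => s + (PySem.Int.ofStr? (String.mk [c])).getD 0) 0
    if PySem.Int.mod sum 2 == 0 then li ++ [i] else li) []

-- ===== PORT B =====
-- inner `while j % 10 == 9: t += 1; j //= 10` of Source B; j = i ≥ 0 comes from range(num),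
-- so running it on i.toNat is exact on every reachable input.
def trailNines (n : Nat) : Nat :=
  if n % 10 = 9 then trailNines (n / 10) + 1 else 0
decreasing_by exact Nat.div_lt_self (by omega) (by omega)

def findevensumofdigits_alt (num : Int) : List Int :=
  ((PySem.List.pyRange 0 num).foldl (fun (st : List Int × Int) i =>
    let li := if st.2 == 0 then st.1 ++ [i] else st.1
    let t : Int := (trailNines i.toNat : Int)
    (li, PySem.Int.mod (st.2 + 1 + t) 2)) ([], 0)).1

-- ===== PRECONDITION & SPEC =====
def Spec_findevensumofdigits (num : Int) (out : List Int) : Prop := out = findevensumofdigits_alt num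
instance (num : Int) (out : List Int) : Decidable (Spec_findevensumofdigits num out) := by unfold Spec_findevensumofdigits; infer_instance

-- ===== CLAIM (what is proved, stated in full; the proofs are below) =====
def Claim_equal_findevensumofdigits : Prop := ∀ (num : Int), Dom_findevensumofdigits num → Spec_findevensumofdigits num (findevensumofdigits num)

-- ===== LEMMAS AND PROOFS =====

-- value of one digit char under A's int(digit)
lemma digitChar_val (d : Nat) (hd : d < 10) :
    (PySem.Int.ofStr? (String.mk [Nat.digitChar d])).getD 0 = (d : Int) := by
  interval_cases d <;> decide

-- digit-char sum of Nat.toDigitsCore = digits sum (A-side characterization)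
lemma toDigitsCore_sum (f : Nat) : ∀ (n : Nat) (acc : List Char), n < f →
    ((Nat.toDigitsCore 10 f n acc).map
        (fun c => (PySem.Int.ofStr? (String.mk [c])).getD 0)).sum
      = ((Nat.digits 10 n).sum : Int)
        + ((acc.map (fun c => (PySem.Int.ofStr? (String.mk [c])).getD 0)).sum) := by
  induction f with
  | zero => intro n acc h; omega
  | succ f ih =>
    intro n acc h
    rw [Nat.toDigitsCore]
    by_cases h10 : n / 10 = 0
    · rw [if_pos h10]
      rcases Nat.eq_zero_or_pos n with h0 | hpos
      · subst h0; simp [digitChar_val 0 (by omega)]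
      · rw [Nat.digits_def' (by omega : (1:Nat) < 10) hpos, h10]
        simp [digitChar_val (n % 10) (by omega)]
    · rw [if_neg h10]
      have hpos : 0 < n := by by_contra h0; omega
      have hlt : n / 10 < f := by
        have := Nat.div_lt_self hpos (by omega : (1:Nat) < 10); omega
      rw [ih (n / 10) _ hlt, Nat.digits_def' (by omega : (1:Nat) < 10) hpos]
      simp [digitChar_val (n % 10) (by omega)]
      ring

-- A's per-i digit sum equals the Mathlib digits sum
lemma strDigitSum_eq (m : Nat) :
    (PySem.Int.toStr (m : Int)).toList.foldl
      (fun s c => s + (PySem.Int.ofStr? (String.mk [c])).getD 0) 0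
    = ((Nat.digits 10 m).sum : Int) := by
  rw [PySem.Int.toList_toStr, PySem.List.foldl_add]
  have : PySem.Int.toChars (m : Int) = Nat.toDigits 10 m := by
    simp [PySem.Int.toChars]
  rw [this, Nat.toDigits, toDigitsCore_sum (m + 1) m [] (by omega)]
  simp

-- carry identity: digit sum changes by 1 - 9 * (trailing nines) when incrementing
lemma digits_sum_succ (n : Nat) :
    (Nat.digits 10 (n + 1)).sum + 9 * trailNines n = (Nat.digits 10 n).sum + 1 := by
  induction n using Nat.strong_induction_on with
  | _ n ih =>
    rw [trailNines]
    have hdm := Nat.div_add_mod n 10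
    by_cases h9 : n % 10 = 9
    · rw [if_pos h9]
      set q := n / 10 with hq
      have hn : n = 10 * q + 9 := by omega
      have h1 : n + 1 = 10 * (q + 1) := by omega
      have hdn : Nat.digits 10 n = 9 :: Nat.digits 10 q := by
        rw [Nat.digits_def' (by omega : (1:Nat) < 10) (by omega : 0 < n), h9]
      have e1 : (n + 1) % 10 = 0 := by omega
      have e2 : (n + 1) / 10 = q + 1 := by omega
      have hdn1 : Nat.digits 10 (n + 1) = 0 :: Nat.digits 10 (q + 1) := by
        rw [Nat.digits_def' (by omega : (1:Nat) < 10) (by omega : 0 < n + 1), e1, e2]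
      have hqlt : q < n := by omega
      have := ih q hqlt
      rw [hdn, hdn1]; simp only [List.sum_cons]; omega
    · rw [if_neg h9]
      have hlt : n % 10 < 9 := by omega
      have e1 : (n + 1) % 10 = n % 10 + 1 := by omega
      have e2 : (n + 1) / 10 = n / 10 := by omega
      have hdn1 : Nat.digits 10 (n + 1) = (n % 10 + 1) :: Nat.digits 10 (n / 10) := by
        rw [Nat.digits_def' (by omega : (1:Nat) < 10) (by omega : 0 < n + 1), e1, e2]
      rcases Nat.eq_zero_or_pos n with h0 | hpos
      · subst h0; simp
      · have hdn : Nat.digits 10 n = n % 10 :: Nat.digits 10 (n / 10) := by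
          rw [Nat.digits_def' (by omega : (1:Nat) < 10) hpos]
        rw [hdn, hdn1]; simp only [List.sum_cons]; omega

-- main invariant over range m: A's list = B's list, and B's parity tracks digits-sum m
lemma loop_invariant (m : Nat) :
    ((List.range m).map (fun k : Nat => (k : Int))).foldl (fun (st : List Int × Int) i =>
        let li := if st.2 == 0 then st.1 ++ [i] else st.1
        let t : Int := (trailNines i.toNat : Int)
        (li, PySem.Int.mod (st.2 + 1 + t) 2)) ([], 0)
    = (((List.range m).map (fun k : Nat => (k : Int))).foldl (fun li i =>
        let sum : Int := (PySem.Int.toStr i).toList.foldl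
          (fun s c => s + (PySem.Int.ofStr? (String.mk [c])).getD 0) 0
        if PySem.Int.mod sum 2 == 0 then li ++ [i] else li) [],
       (((Nat.digits 10 m).sum : Int)) % 2) := by
  induction m with
  | zero => simp
  | succ m ih =>
    rw [List.range_succ, List.map_append, List.foldl_append, List.foldl_append, ih]
    simp only [List.map_cons, List.map_nil, List.foldl_cons, List.foldl_nil]
    have hsum := strDigitSum_eq m
    have htoNat : ((m : Int)).toNat = m := Int.toNat_natCast m
    have hmodA : PySem.Int.mod ((Nat.digits 10 m).sum : Int) 2
        = ((Nat.digits 10 m).sum : Int) % 2 := PySem.Int.mod_eq_emod_of_pos (by omega)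
    have hcarry := digits_sum_succ m
    rw [Prod.mk.injEq]
    constructor
    · -- lists: append conditions agree
      rw [hsum, hmodA]
    · -- parity update
      rw [htoNat, PySem.Int.mod_eq_emod_of_pos (by omega : (0:Int) < 2)]
      have hcarry' : ((Nat.digits 10 (m + 1)).sum : Int) + 9 * (trailNines m : Int)
          = ((Nat.digits 10 m).sum : Int) + 1 := by exact_mod_cast hcarry
      omega

lemma pyRange_nonpos (num : Int) (h : num ≤ 0) : PySem.List.pyRange 0 num = [] := by
  simp [PySem.List.pyRange]
  omega

-- ===== VERDICT (by name: the statement is the Claim_ definition above) =====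
theorem findevensumofdigits_spec : Claim_equal_findevensumofdigits := by
  intro num _
  unfold Spec_findevensumofdigits findevensumofdigits findevensumofdigits_alt
  by_cases h : num ≤ 0
  · rw [pyRange_nonpos num h]; rfl
  · obtain ⟨n, rfl⟩ : ∃ n : Nat, num = (n : Int) :=
      ⟨num.toNat, (Int.toNat_of_nonneg (by omega)).symm⟩
    rw [PySem.List.pyRange_zero_natCast, loop_invariant n]
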